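-- pv_equiv track=rewrite | github.com/paoloearth/acat | acat/acat.py | wordsgenerator_uptoK
-- ===== SOURCE A (Python) =====
-- def wordsgenerator_uptoK(alphabet, length):
--     """
--        Generate all the permutations of
--        the chars of the string length length
--        and output them into a list
--        -----------------------------------------
--         Parameters:
--             alphabet (str)
--             length (int)
--
--         eg.
--         wordsgenerator_uptoK("AB",2)
--
--         output:
--         ['AA', 'AB', 'BA', 'BB']
--
--             """
--     c = [[]]
--     for i in range(length):
--         c = [ [x]+y     for x in alphabet      for y in c]
--
--     wordsofsize=list()
--     for w in c:
--         wordsofsize.append(''.join(w))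
--     return wordsofsize
-- ===== SOURCE B (Python) =====
-- def wordsgenerator_uptoK(alphabet, length):
--     base = len(alphabet)
--     words = []
--     for i in range(base ** length):
--         digits = []
--         n = i
--         for _ in range(length):
--             n, d = divmod(n, base)
--             digits.append(alphabet[d])
--         digits.reverse()
--         words.append(''.join(digits))
--     return words
-- ===== Notes on version B (the rewrite author's own statement) =====
-- stated objective: alternative
-- what changed: Replaces the iterative cross-product list-of-lists construction with direct index-to-word arithmetic (each index i in range(base**length) is converted to base-|alphabet| digits by repeated divmod and mapped through the alphabet, same lexicographic order); Pre_ excludes negative lengths, where A's [''] is an artefact of an empty range() loop and B's base**length is a float so range() raises.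
-- outside the precondition, e.g. on wordsgenerator_uptoK('AB', -1): A returns [''], B raises TypeError
import Mathlib
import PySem

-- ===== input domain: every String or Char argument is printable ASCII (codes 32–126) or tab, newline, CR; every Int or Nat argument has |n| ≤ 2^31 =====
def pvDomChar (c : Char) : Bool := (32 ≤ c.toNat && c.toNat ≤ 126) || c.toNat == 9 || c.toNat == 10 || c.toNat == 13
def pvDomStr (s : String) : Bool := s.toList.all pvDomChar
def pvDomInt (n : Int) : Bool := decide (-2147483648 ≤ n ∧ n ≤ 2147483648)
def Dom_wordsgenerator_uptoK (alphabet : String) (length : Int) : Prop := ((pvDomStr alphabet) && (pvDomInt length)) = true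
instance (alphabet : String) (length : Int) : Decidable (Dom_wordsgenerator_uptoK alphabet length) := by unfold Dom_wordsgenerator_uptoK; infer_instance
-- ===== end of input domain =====

-- B replaces A's iterated cross-product list building by index-to-word base-|alphabet| digit
-- arithmetic (same lexicographic output, a genuinely different construction; no speed claim).

-- ===== PORT A =====
-- c = [[x]+y for x in alphabet for y in c]
def pvStepA (alpha : List Char) (c : List (List Char)) : List (List Char) :=
  alpha.flatMap (fun x => c.map (fun y => x :: y))

def wordsgenerator_uptoK (alphabet : String) (length : Int) : List String :=
  -- for i in range(length): c = [[x]+y ...]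
  let c := (PySem.List.pyRange 0 length 1).foldl (fun c _ => pvStepA alphabet.toList c) [[]]
  -- for w in c: wordsofsize.append(''.join(w))  — ''.join over 1-char strings = String.ofList (exact)
  c.foldl (fun acc w => acc ++ [String.ofList w]) []

-- ===== PORT B =====
def wordsgenerator_uptoK_alt (alphabet : String) (length : Int) : List String :=
  let alpha := alphabet.toList
  let base := alpha.length
  -- base ** length with length.toNat: exact since Pre_ requires 0 ≤ length
  let total := base ^ length.toNat
  (List.range total).foldl (fun words i =>
    -- inner loop: n, d = divmod(n, base); digits.append(alphabet[d])
    -- n, i are non-negative so Python divmod = Nat div/mod (exact); alphabet[d] always has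
    -- d < base whenever the body runs (total > 0 forces base > 0), so getD is exact here
    words ++ [String.ofList
      ((List.range length.toNat).foldl
        (fun (st : Nat × List Char) _ => (st.1 / base, st.2 ++ [alpha.getD (st.1 % base) 'A']))
        (i, [])).2.reverse]) []

-- ===== PRECONDITION & SPEC =====
-- Pre_ excludes length < 0, where A's value [''] is an artefact of an empty range() loop and
-- B's base ** length is a float, so B's range() raises.
def Pre_wordsgenerator_uptoK (alphabet : String) (length : Int) : Prop := 0 ≤ length
instance (alphabet : String) (length : Int) : Decidable (Pre_wordsgenerator_uptoK alphabet length) := by unfold Pre_wordsgenerator_uptoK; infer_instance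

def pvWitness_wordsgenerator_uptoK : String × Int := ("AB", 2)

def Spec_wordsgenerator_uptoK (alphabet : String) (length : Int) (out : List String) : Prop := out = wordsgenerator_uptoK_alt alphabet length
instance (alphabet : String) (length : Int) (out : List String) : Decidable (Spec_wordsgenerator_uptoK alphabet length out) := by unfold Spec_wordsgenerator_uptoK; infer_instance

-- ===== CLAIM (what is proved, stated in full; the proofs are below) =====
def Claim_equal_wordsgenerator_uptoK : Prop := ∀ (alphabet : String) (length : Int), Dom_wordsgenerator_uptoK alphabet length → Pre_wordsgenerator_uptoK alphabet length → Spec_wordsgenerator_uptoK alphabet length (wordsgenerator_uptoK alphabet length)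

-- ===== LEMMAS AND PROOFS =====

-- digits of n, least-significant first (mirrors B's inner loop)
def pvD (alpha : List Char) (base : Nat) : Nat → Nat → List Char
  | 0, _ => []
  | k+1, n => alpha.getD (n % base) 'A' :: pvD alpha base k (n / base)

-- digits of n, most-significant first
def pvG (alpha : List Char) (base : Nat) : Nat → Nat → List Char
  | 0, _ => []
  | k+1, n => alpha.getD ((n / base ^ k) % base) 'A' :: pvG alpha base k n

theorem pv_foldl_const {α β : Type} (f : α → α) (init : α) (l : List β) :
    l.foldl (fun a _ => f a) init = f^[l.length] init := by
  induction l generalizing init with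
  | nil => rfl
  | cons x xs ih => simp [List.foldl_cons, ih, Function.iterate_succ_apply]

theorem pv_foldl_append_map {α β : Type} (f : α → β) (l : List α) (acc : List β) :
    l.foldl (fun acc w => acc ++ [f w]) acc = acc ++ l.map f := by
  induction l generalizing acc with
  | nil => simp
  | cons x xs ih => simp [List.foldl_cons, ih]

theorem pvB_inner (alpha : List Char) (base : Nat) (k : Nat) :
    ∀ (n : Nat) (acc : List Char),
      (fun (st : Nat × List Char) =>
        (st.1 / base, st.2 ++ [alpha.getD (st.1 % base) 'A']))^[k] (n, acc)
      = (n / base ^ k, acc ++ pvD alpha base k n) := by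
  induction k with
  | zero => intro n acc; simp [pvD]
  | succ k ih =>
    intro n acc
    rw [Function.iterate_succ_apply, ih]
    simp [pvD, Nat.div_div_eq_div_mul, pow_succ, mul_comm]

theorem pvG_snoc (alpha : List Char) (base : Nat) (k : Nat) (n : Nat) :
    pvG alpha base (k+1) n = pvG alpha base k (n / base) ++ [alpha.getD (n % base) 'A'] := by
  induction k generalizing n with
  | zero => simp [pvG]
  | succ k ih =>
    have hd : n / base / base ^ k = n / base ^ (k+1) := by
      rw [Nat.div_div_eq_div_mul, pow_succ, mul_comm]
    calc pvG alpha base (k+2) n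
        = alpha.getD ((n / base ^ (k+1)) % base) 'A' :: pvG alpha base (k+1) n := rfl
      _ = alpha.getD ((n / base ^ (k+1)) % base) 'A' ::
            (pvG alpha base k (n / base) ++ [alpha.getD (n % base) 'A']) := by rw [ih]
      _ = pvG alpha base (k+1) (n / base) ++ [alpha.getD (n % base) 'A'] := by
            simp [pvG, hd]

theorem pvD_reverse (alpha : List Char) (base : Nat) (k : Nat) :
    ∀ n, (pvD alpha base k n).reverse = pvG alpha base k n := by
  induction k with
  | zero => intro n; rfl
  | succ k ih =>
    intro n
    rw [pvG_snoc]
    simp [pvD, ih]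

theorem pvG_mod (alpha : List Char) (base : Nat) (k : Nat) :
    ∀ n, pvG alpha base k n = pvG alpha base k (n % base ^ k) := by
  induction k with
  | zero => intro n; rfl
  | succ k ih =>
    intro n
    have hdig : (n % base ^ (k+1)) / base ^ k % base = n / base ^ k % base := by
      rw [pow_succ, Nat.mod_mul_right_div_self, Nat.mod_mod_of_dvd _ dvd_rfl]
    have htail : pvG alpha base k (n % base ^ (k+1)) = pvG alpha base k n := by
      rw [ih (n % base ^ (k+1)), Nat.mod_mod_of_dvd _ (pow_dvd_pow base (Nat.le_succ k)), ← ih n]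
    simp [pvG, hdig, htail]

theorem pvG_split (alpha : List Char) (base : Nat) (k : Nat) (j i : Nat)
    (hj : j < base) (hi : i < base ^ k) :
    pvG alpha base (k+1) (j * base ^ k + i) = alpha.getD j 'A' :: pvG alpha base k i := by
  have hpos : 0 < base ^ k := lt_of_le_of_lt (Nat.zero_le i) hi
  have hhead : (j * base ^ k + i) / base ^ k % base = j := by
    rw [mul_comm, Nat.mul_add_div hpos, Nat.div_eq_of_lt hi, Nat.add_zero,
      Nat.mod_eq_of_lt hj]
  have htail : pvG alpha base k (j * base ^ k + i) = pvG alpha base k i := by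
    rw [pvG_mod, Nat.add_comm, mul_comm, Nat.add_mul_mod_self_left, ← pvG_mod]
  simp [pvG, hhead, htail]

theorem pv_range_mul (b M : Nat) :
    List.range (b * M) = (List.range b).flatMap (fun j => (List.range M).map (fun i => j * M + i)) := by
  induction b with
  | zero => simp
  | succ b ih =>
    rw [Nat.succ_mul, List.range_add, ih, List.range_succ, List.flatMap_append]
    simp

theorem pv_map_getD_range (l : List Char) (d : Char) :
    (List.range l.length).map (fun j => l.getD j d) = l := by
  apply List.ext_getElem
  · simp
  · intro i h1 h2
    simp [List.getElem?_eq_getElem h2]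

theorem pvA_iter (alpha : List Char) (k : Nat) :
    (pvStepA alpha)^[k] [[]] =
      (List.range (alpha.length ^ k)).map (pvG alpha alpha.length k) := by
  induction k with
  | zero => simp [pvG, List.range_one]
  | succ k ih =>
    rw [Function.iterate_succ_apply', ih]
    have hR : List.range (alpha.length ^ (k+1)) =
        (List.range alpha.length).flatMap
          (fun j => (List.range (alpha.length ^ k)).map (fun i => j * alpha.length ^ k + i)) := by
      rw [pow_succ, mul_comm]
      exact pv_range_mul _ _
    calc pvStepA alpha ((List.range (alpha.length ^ k)).map (pvG alpha alpha.length k))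
        = ((List.range alpha.length).map (fun j => alpha.getD j 'A')).flatMap
            (fun x => ((List.range (alpha.length ^ k)).map (pvG alpha alpha.length k)).map
              (fun y => x :: y)) := by
          unfold pvStepA; rw [pv_map_getD_range]
      _ = (List.range alpha.length).flatMap
            (fun j => (List.range (alpha.length ^ k)).map
              (fun i => alpha.getD j 'A' :: pvG alpha alpha.length k i)) := by
          simp [List.flatMap_map, List.map_map, Function.comp_def]
      _ = (List.range alpha.length).flatMap
            (fun j => (List.range (alpha.length ^ k)).map
              (fun i => pvG alpha alpha.length (k+1) (j * alpha.length ^ k + i))) := by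
          apply List.flatMap_congr
          intro j hj
          apply List.map_congr_left
          intro i hi
          exact (pvG_split alpha alpha.length k j i (List.mem_range.mp hj)
            (List.mem_range.mp hi)).symm
      _ = (List.range (alpha.length ^ (k+1))).map (pvG alpha alpha.length (k+1)) := by
          rw [hR]
          simp [List.map_flatMap, List.map_map, Function.comp_def]

-- ===== VERDICT (by name: the statement is the Claim_ definition above) =====
theorem wordsgenerator_uptoK_spec : Claim_equal_wordsgenerator_uptoK := by
  intro alphabet length _ hpre
  unfold Spec_wordsgenerator_uptoK wordsgenerator_uptoK wordsgenerator_uptoK_alt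
  -- A side
  rw [pv_foldl_const, PySem.List.length_pyRange_one]
  have hlen : (length - 0).toNat = length.toNat := by omega
  rw [hlen, pvA_iter, pv_foldl_append_map, pv_foldl_append_map, List.map_map]
  apply List.map_congr_left
  intro i _
  simp only [Function.comp]
  rw [pv_foldl_const, List.length_range, pvB_inner]
  simp [pvD_reverse]
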